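-- pv_equiv track=rewrite | github.com/yaolongt/smua | data-collation/data-collation-web/web_fa/views.py | format_location_by_date
-- ===== SOURCE A (Python) =====
-- def format_location_by_date(sorted_venue):
--     """
--     This function groups a location by date.
--     The group will use the first date by each location.
--
--     Assumption made: Only 1 location per day for each session.
--     """
--     session_venues_map = {}
--     for session in sorted_venue:
--         parts = session.split("Venue:")
--
--         session_date = parts[0].split(" ")[0]
--
--         if session_date in session_venues_map:
--             continue
--
--         session_venue = parts[1][1:]
--         session_venues_map[session_date] = session_venue
--
--     res = ""
--     for k, v in session_venues_map.items():
--         res += f'{k} \n{v}\n\n'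
--
--     return res
-- ===== SOURCE B (Python) =====
-- def format_location_by_date(sorted_venue):
--     """Selection-style dedup: split every session once up front into
--     (date, parts); then repeatedly take the first pending entry, emit its
--     block, and delete every remaining entry with the same date. No dict and
--     no seen-set is kept."""
--     pending = [(parts[0].split(" ")[0], parts)
--                for parts in (s.split("Venue:") for s in sorted_venue)]
--     res = ""
--     while pending:
--         date, parts = pending[0]
--         res += f'{date} \n{parts[1][1:]}\n\n'
--         pending = [t for t in pending[1:] if t[0] != date]
--     return res
-- ===== Notes on version B (the rewrite author's own statement) =====
-- stated objective: alternative
-- what changed: A builds a date->venue dict in one pass and concatenates its items in a second pass; B does selection-style deduplication: pre-split all sessions into (date, parts) pairs, then repeatedly emit the first pending entry's block and delete all remaining entries sharing its date, so no dict or seen-set exists at all.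
import Mathlib
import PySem

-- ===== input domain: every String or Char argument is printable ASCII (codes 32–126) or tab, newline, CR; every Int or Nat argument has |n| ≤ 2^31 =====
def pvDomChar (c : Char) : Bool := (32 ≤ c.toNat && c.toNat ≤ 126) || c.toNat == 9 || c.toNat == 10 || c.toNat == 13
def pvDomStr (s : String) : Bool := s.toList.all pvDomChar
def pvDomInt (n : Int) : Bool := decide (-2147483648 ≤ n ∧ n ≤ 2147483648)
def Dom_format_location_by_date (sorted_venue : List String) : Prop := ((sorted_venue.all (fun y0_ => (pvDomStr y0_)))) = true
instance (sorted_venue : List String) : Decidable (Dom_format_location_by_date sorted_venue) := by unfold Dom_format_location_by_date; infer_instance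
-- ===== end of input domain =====

-- B replaces A's dict-then-render two passes by selection-style deduplication:
-- pre-split all sessions, then repeatedly emit the first pending block and delete
-- every later entry with the same date (alternative decomposition, same cost class).

-- ===== PORT A =====
-- loop of A: builds the date→venue dict; none = the Python raises IndexError
-- (parts[1] on a session without "Venue:" whose date is new) — excluded by Pre_.
def fla_loop : List String → PySem.Dict String String → Option (PySem.Dict String String)
  | [], m => some m
  | session :: rest, m =>
    let parts := (PySem.Str.split? session "Venue:").getD []
    let session_date :=
      PySem.List.pyGetD ((PySem.Str.split? (PySem.List.pyGetD parts 0 "") " ").getD []) 0 ""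
    if m.contains session_date then
      fla_loop rest m
    else
      match PySem.List.pyGet? parts 1 with
      | none => none
      | some p1 => fla_loop rest (m.insert session_date (PySem.Str.slice p1 (some 1) none))

-- second pass of A: res += f'{k} \n{v}\n\n' over the dict items
def fla_render (m : PySem.Dict String String) : String :=
  m.items.foldl (fun res kv => res ++ kv.1 ++ " \n" ++ kv.2 ++ "\n\n") ""

def format_location_by_date (sorted_venue : List String) : String :=
  match fla_loop sorted_venue PySem.Dict.empty with
  | some m => fla_render m
  | none => ""   -- unreachable under Pre_: the Python raises IndexError here

-- ===== PORT B =====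
-- B's pre-split pass: [(parts[0].split(" ")[0], parts) for parts in (s.split("Venue:") for s in sorted_venue)]
def flb_prep (sorted_venue : List String) : List (String × List String) :=
  sorted_venue.map (fun s =>
    let parts := (PySem.Str.split? s "Venue:").getD []
    (PySem.List.pyGetD ((PySem.Str.split? (PySem.List.pyGetD parts 0 "") " ").getD []) 0 "", parts))

-- B's while loop: emit the first pending block, drop all remaining entries with its date
def flb_loop (pending : List (String × List String)) (res : String) : Option String :=
  match pending with
  | [] => some res
  | (date, parts) :: rest =>
    match PySem.List.pyGet? parts 1 with
    | none => none   -- same IndexError as A's Python; excluded by Pre_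
    | some p1 =>
      flb_loop (rest.filter (fun t => t.1 != date))
        (res ++ date ++ " \n" ++ PySem.Str.slice p1 (some 1) none ++ "\n\n")
termination_by pending.length
decreasing_by
  simp only [List.length_cons, List.unattach, List.length_map]
  exact Nat.lt_succ_of_le (le_trans (List.length_filter_le _ _) (by simp))

def format_location_by_date_alt (sorted_venue : List String) : String :=
  (flb_loop (flb_prep sorted_venue) "").getD ""

-- ===== PRECONDITION & SPEC =====
-- the date a session is grouped under (used only to state Pre_)
def pvDate (s : String) : String :=
  PySem.List.pyGetD ((PySem.Str.split? (PySem.List.pyGetD ((PySem.Str.split? s "Venue:").getD []) 0 "") " ").getD []) 0 ""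

-- Pre_ excludes exactly the inputs where the Python A raises IndexError: a session
-- whose date has not appeared before must contain "Venue:".
def Pre_format_location_by_date (sorted_venue : List String) : Prop :=
  ∀ i, i < sorted_venue.length →
    pvDate (sorted_venue.getD i "") ∉ (sorted_venue.take i).map pvDate →
    PySem.Str.isIn "Venue:" (sorted_venue.getD i "") = true

instance (sorted_venue : List String) : Decidable (Pre_format_location_by_date sorted_venue) := by
  unfold Pre_format_location_by_date; infer_instance

def pvWitness_format_location_by_date : List String :=
  ["1 Venue: A"]

def Spec_format_location_by_date (sorted_venue : List String) (out : String) : Prop := out = format_location_by_date_alt sorted_venue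
instance (sorted_venue : List String) (out : String) : Decidable (Spec_format_location_by_date sorted_venue out) := by unfold Spec_format_location_by_date; infer_instance

-- ===== CLAIM =====
def Claim_equal_format_location_by_date : Prop := ∀ (sorted_venue : List String), Dom_format_location_by_date sorted_venue → Pre_format_location_by_date sorted_venue → Spec_format_location_by_date sorted_venue (format_location_by_date sorted_venue)

-- ===== LEMMAS AND PROOFS =====

-- A's loop restated over B's pre-split pairs (same computation, pair-shaped input)
def fla_loop' : List (String × List String) → PySem.Dict String String → Option (PySem.Dict String String)
  | [], m => some m
  | (date, parts) :: rest, m =>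
    if m.contains date then
      fla_loop' rest m
    else
      match PySem.List.pyGet? parts 1 with
      | none => none
      | some p1 => fla_loop' rest (m.insert date (PySem.Str.slice p1 (some 1) none))

theorem fla_loop_eq_loop' (sv : List String) :
    ∀ m, fla_loop sv m = fla_loop' (flb_prep sv) m := by
  induction sv with
  | nil => intro m; rfl
  | cons s rest ih =>
    intro m
    simp only [fla_loop, flb_prep, List.map_cons, fla_loop']
    split
    · exact ih m
    · cases PySem.List.pyGet? ((PySem.Str.split? s "Venue:").getD []) 1 with
      | none => rfl
      | some p1 => exact ih _

-- rendering one more (fresh-keyed) item appends one block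
theorem fla_render_insert (m : PySem.Dict String String) (k v : String)
    (h : m.contains k = false) :
    fla_render (m.insert k v) = fla_render m ++ k ++ " \n" ++ v ++ "\n\n" := by
  unfold fla_render
  rw [PySem.Dict.items_insert_of_not_contains m v h, List.foldl_append]
  rfl

-- A skips every session whose date is already a key: filtering them out is a no-op
theorem fla_loop'_filter (d : String) :
    ∀ (L : List (String × List String)) (m : PySem.Dict String String),
      m.contains d = true →
      fla_loop' L m = fla_loop' (L.filter (fun t => t.1 != d)) m := by
  intro L
  induction L with
  | nil => intro m _; rfl
  | cons t rest ih =>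
    intro m hm
    obtain ⟨d', parts'⟩ := t
    by_cases hd : d' = d
    · subst hd
      have hrm : ((d', parts') :: rest).filter (fun t => t.1 != d')
          = rest.filter (fun t => t.1 != d') := by simp
      rw [hrm]
      simp only [fla_loop', hm, if_true]
      exact ih m hm
    · have hkeep : ((d', parts') :: rest).filter (fun t => t.1 != d)
          = (d', parts') :: rest.filter (fun t => t.1 != d) := by
        simp [hd]
      rw [hkeep]
      simp only [fla_loop']
      rcases hc : m.contains d' with _ | _
      · simp only [Bool.false_eq_true, if_false]
        cases hp : PySem.List.pyGet? parts' 1 with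
        | none => rfl
        | some p1 =>
          dsimp only
          apply ih
          rw [PySem.Dict.contains_insert, hm, Bool.or_true]
      · simp only [if_true]
        exact ih m hm

-- lockstep lemma: on pending lists whose dates are all fresh for m, A's dict loop
-- (rendered) equals B's selection loop started from m's rendering
theorem loop_eq :
    ∀ (n : ℕ) (L : List (String × List String)) (m : PySem.Dict String String),
      L.length ≤ n →
      (∀ t ∈ L, m.contains t.1 = false) →
      (fla_loop' L m).map fla_render = flb_loop L (fla_render m) := by
  intro n
  induction n with
  | zero =>
    intro L m hlen _
    have : L = [] := List.eq_nil_of_length_eq_zero (Nat.le_zero.mp hlen)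
    subst this; simp [fla_loop', flb_loop]
  | succ n ih =>
    intro L m hlen hfresh
    cases L with
    | nil => simp [fla_loop', flb_loop]
    | cons t rest =>
      obtain ⟨d, parts⟩ := t
      have hd : m.contains d = false := hfresh (d, parts) (by simp)
      simp only [fla_loop', hd, Bool.false_eq_true, if_false, flb_loop]
      cases hp : PySem.List.pyGet? parts 1 with
      | none => rfl
      | some p1 =>
        dsimp only
        set v := PySem.Str.slice p1 (some 1) none with hv
        rw [fla_loop'_filter d rest (m.insert d v)
              (by rw [PySem.Dict.contains_insert]; simp)]
        have hlen' : (rest.filter (fun t => t.1 != d)).length ≤ n :=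
          le_trans (List.length_filter_le _ _) (Nat.le_of_succ_le_succ (by simpa using hlen))
        have hfresh' : ∀ t ∈ rest.filter (fun t => t.1 != d),
            (m.insert d v).contains t.1 = false := by
          intro t ht
          have hmem := List.mem_of_mem_filter ht
          have hne : (t.1 != d) = true := by
            have := List.mem_filter.mp ht; exact this.2
          rw [PySem.Dict.contains_insert]
          simp only [Bool.or_eq_false_iff]
          exact ⟨by simpa using hne, hfresh t (by simp [hmem])⟩
        have := ih (rest.filter (fun t => t.1 != d)) (m.insert d v) hlen' hfresh'
        rw [fla_render_insert m d v hd] at this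
        exact this

-- ===== VERDICT =====
theorem format_location_by_date_spec : Claim_equal_format_location_by_date := by
  intro sv _hdom _hpre
  unfold Spec_format_location_by_date format_location_by_date format_location_by_date_alt
  have h0 : (fla_loop' (flb_prep sv) PySem.Dict.empty).map fla_render
      = flb_loop (flb_prep sv) (fla_render PySem.Dict.empty) :=
    loop_eq (flb_prep sv).length _ _ le_rfl
      (fun t _ => PySem.Dict.contains_empty t.1)
  have hren : fla_render PySem.Dict.empty = "" := rfl
  rw [hren] at h0
  rw [fla_loop_eq_loop' sv]
  cases hfa : fla_loop' (flb_prep sv) PySem.Dict.empty with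
  | some m =>
    rw [hfa] at h0
    rw [show flb_loop (flb_prep sv) "" = some (fla_render m) from h0.symm]
    rfl
  | none =>
    rw [hfa] at h0
    rw [show flb_loop (flb_prep sv) "" = none from h0.symm]
    rfl
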